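-- pv_equiv track=rewrite | github.com/grapheneaffiliate/h4-polytopic-attention | solve_arc2_train_aa.py | solve_08ed6ac7
-- ===== SOURCE A (Python) =====
-- def solve_08ed6ac7(grid):
--     R, C = len(grid), len(grid[0])
--     out = [[0]*C for _ in range(R)]
--     # Find columns with 5s and their heights
--     col_heights = []
--     for c in range(C):
--         height = sum(1 for r in range(R) if grid[r][c] == 5)
--         if height > 0:
--             col_heights.append((height, c))
--     # Sort by height descending
--     col_heights.sort(key=lambda x: -x[0])
--     # Assign colors 1,2,3,4...
--     for idx, (height, c) in enumerate(col_heights):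
--         color = idx + 1
--         for r in range(R):
--             if grid[r][c] == 5:
--                 out[r][c] = color
--     return out
-- ===== SOURCE B (Python) =====
-- def solve_08ed6ac7(grid):
--     R, C = len(grid), len(grid[0])
--     heights = [sum(1 for r in range(R) if grid[r][c] == 5) for c in range(C)]
--
--     def color(c):
--         h = heights[c]
--         if h == 0:
--             return 0
--         # rank by counting: columns strictly taller, plus equal-height columns to the left
--         return 1 + sum(1 for c2 in range(C)
--                        if heights[c2] > h or (heights[c2] == h and c2 < c))
--
--     colors = [color(c) for c in range(C)]
--     return [[colors[c] if grid[r][c] == 5 else 0 for c in range(C)]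
--             for r in range(R)]
-- ===== Notes on version B (the rewrite author's own statement) =====
-- stated objective: alternative
-- what changed: B never sorts: after one per-column height count it computes each 5-column's color directly as 1 + the number of columns that are strictly taller or equal-height-and-further-left (rank by counting, correct because A's stable descending sort places a column after exactly those columns), then paints the grid in one lookup pass; A builds (height,column) pairs, sorts them descending, and repaints per sorted column.
import Mathlib
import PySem

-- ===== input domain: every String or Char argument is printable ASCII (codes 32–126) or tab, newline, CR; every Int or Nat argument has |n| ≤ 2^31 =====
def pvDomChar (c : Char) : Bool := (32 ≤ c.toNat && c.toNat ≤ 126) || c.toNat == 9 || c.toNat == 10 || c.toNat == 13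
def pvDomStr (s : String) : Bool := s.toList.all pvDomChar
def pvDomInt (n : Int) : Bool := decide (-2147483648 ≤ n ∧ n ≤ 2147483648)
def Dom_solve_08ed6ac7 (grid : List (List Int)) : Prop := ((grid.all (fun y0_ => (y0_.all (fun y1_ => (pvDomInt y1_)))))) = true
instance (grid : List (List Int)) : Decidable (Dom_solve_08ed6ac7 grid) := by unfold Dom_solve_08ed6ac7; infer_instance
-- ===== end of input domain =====

-- B replaces A's sort entirely: each 5-column's color is computed directly as
-- 1 + (number of strictly taller columns) + (number of equal-height columns to its left),
-- then the grid is painted in one lookup pass; equal return values (A mutates only its own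
-- fresh output list, so side effects are not at issue).

-- ===== PORT A =====
def solve_08ed6ac7 (grid : List (List Int)) : List (List Int) :=
  let R : Int := PySem.List.len grid
  let C : Int := PySem.List.len (PySem.List.pyGetD grid 0 [])
  let out : List (List Int) := (PySem.List.pyRange 0 R).map (fun _ => PySem.List.pyRepeat [0] C)
  let col_heights : List (Int × Int) :=
    (PySem.List.pyRange 0 C).foldl (fun acc c =>
      let height : Int := (PySem.List.pyRange 0 R).foldl
        (fun s r => if PySem.List.pyGetD (PySem.List.pyGetD grid r []) c 0 = 5 then s + 1 else s) 0
      if height > 0 then acc ++ [(height, c)] else acc) []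
  let col_heights : List (Int × Int) := PySem.List.sorted col_heights (fun x => -x.1)
  let out : List (List Int) := (PySem.List.enumerate col_heights 0).foldl (fun out p =>
      let color : Int := p.1 + 1
      let c : Int := p.2.2
      (PySem.List.pyRange 0 R).foldl (fun out r =>
        if PySem.List.pyGetD (PySem.List.pyGetD grid r []) c 0 = 5 then
          PySem.List.pySetD out r (PySem.List.pySetD (PySem.List.pyGetD out r []) c color)
        else out) out) out
  out

-- ===== PORT B =====
def solve_08ed6ac7_alt (grid : List (List Int)) : List (List Int) :=
  let R : Int := PySem.List.len grid
  let C : Int := PySem.List.len (PySem.List.pyGetD grid 0 [])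
  let heights : List Int := (PySem.List.pyRange 0 C).map (fun c =>
      (PySem.List.pyRange 0 R).foldl
        (fun s r => if PySem.List.pyGetD (PySem.List.pyGetD grid r []) c 0 = 5 then s + 1 else s) 0)
  let color : Int → Int := fun c =>
    let h : Int := PySem.List.pyGetD heights c 0
    if h = 0 then 0
    else 1 + (PySem.List.pyRange 0 C).foldl
      (fun s c2 => if PySem.List.pyGetD heights c2 0 > h ∨
          (PySem.List.pyGetD heights c2 0 = h ∧ c2 < c) then s + 1 else s) 0
  let colors : List Int := (PySem.List.pyRange 0 C).map color
  (PySem.List.pyRange 0 R).map (fun r => (PySem.List.pyRange 0 C).map (fun c =>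
      if PySem.List.pyGetD (PySem.List.pyGetD grid r []) c 0 = 5
      then PySem.List.pyGetD colors c 0 else 0))

-- ===== PRECONDITION & SPEC =====
-- Pre_ excludes exactly the inputs where the Python A raises: the empty grid (grid[0] is an
-- IndexError) and grids with some row shorter than the first row (grid[r][c] IndexError).
def Pre_solve_08ed6ac7 (grid : List (List Int)) : Prop :=
  grid ≠ [] ∧ ∀ row ∈ grid, (grid.headD []).length ≤ row.length
instance (grid : List (List Int)) : Decidable (Pre_solve_08ed6ac7 grid) := by
  unfold Pre_solve_08ed6ac7; infer_instance
def pvWitness_solve_08ed6ac7 : List (List Int) := [[5, 0], [5, 5]]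
def Spec_solve_08ed6ac7 (grid : List (List Int)) (out : List (List Int)) : Prop := out = solve_08ed6ac7_alt grid
instance (grid : List (List Int)) (out : List (List Int)) : Decidable (Spec_solve_08ed6ac7 grid out) := by unfold Spec_solve_08ed6ac7; infer_instance

-- ===== CLAIM (what is proved, stated in full; the proofs are below) =====
def Claim_equal_solve_08ed6ac7 : Prop := ∀ (grid : List (List Int)), Dom_solve_08ed6ac7 grid → Pre_solve_08ed6ac7 grid → Spec_solve_08ed6ac7 grid (solve_08ed6ac7 grid)

-- ===== LEMMAS AND PROOFS =====

-- last-write scan: value at column c after writing i+1 at each position i whose element is c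
def lcScan : List Int → Int → Int → Int → Int
  | [], _, _, d => d
  | x :: t, s, c, d => lcScan t (s + 1) c (if x = c then s + 1 else d)

theorem insertBy_cons {α : Type} (b : α → α → Bool) (x y : α) (ys : List α) :
    PySem.List.insertBy b x (y :: ys) =
      if b x y then x :: y :: ys else y :: PySem.List.insertBy b x ys := rfl

theorem insertBy_map {α β : Type} (f : α → β) (b1 : β → β → Bool) (b2 : α → α → Bool)
    (hb : ∀ a c, b1 (f a) (f c) = b2 a c) (x : α) (ys : List α) :
    PySem.List.insertBy b1 (f x) (ys.map f) = (PySem.List.insertBy b2 x ys).map f := by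
  induction ys with
  | nil => rfl
  | cons y t ih =>
      simp only [List.map_cons, insertBy_cons, hb]
      by_cases h : b2 x y = true
      · simp [h]
      · simp [h, ih]

theorem foldl_insertBy_map {α β κ : Type} [LT κ] [DecidableLT κ]
    (f : α → β) (kA : β → κ) (kB : α → κ)
    (hb : ∀ a c, decide (kA (f a) < kA (f c)) = decide (kB a < kB c)) :
    ∀ (xs acc : List α),
    (xs.map f).foldl (fun acc y => PySem.List.insertBy (fun a c => decide (kA a < kA c)) y acc) (acc.map f)
      = (xs.foldl (fun acc x => PySem.List.insertBy (fun a c => decide (kB a < kB c)) x acc) acc).map f := by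
  intro xs
  induction xs with
  | nil => intro acc; rfl
  | cons x t ih =>
      intro acc
      simp only [List.map_cons, List.foldl_cons]
      rw [insertBy_map f _ _ hb x acc]
      exact ih _

theorem sorted_map_commute {α β κ : Type} [LT κ] [DecidableLT κ]
    (f : α → β) (kA : β → κ) (kB : α → κ)
    (hb : ∀ a c, decide (kA (f a) < kA (f c)) = decide (kB a < kB c)) (xs : List α) :
    PySem.List.sorted (xs.map f) kA = (PySem.List.sorted xs kB).map f := by
  rw [PySem.List.sorted_eq_foldl_insertBy, PySem.List.sorted_eq_foldl_insertBy]
  have := foldl_insertBy_map f kA kB hb xs []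
  simpa using this

-- the stable-sort tie-break order B counts with: strictly smaller key, or equal key and earlier index
def rbk (k : Int → Int) (a b : Int) : Bool := decide (k a < k b ∨ (k a = k b ∧ a < b))

theorem rbk_irrefl (k : Int → Int) (a : Int) : rbk k a a = false := by
  simp [rbk]

theorem rbk_asymm (k : Int → Int) {a b : Int} (h : rbk k a b = true) : rbk k b a = false := by
  simp only [rbk, decide_eq_true_eq] at h
  simp only [rbk, decide_eq_false_iff_not]
  omega

theorem rbk_le (k : Int → Int) {a b : Int} (h : rbk k a b = true) : k a ≤ k b := by
  simp only [rbk, decide_eq_true_eq] at h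
  omega

theorem insertBy_pairwise_rbk (k : Int → Int) (x : Int) : ∀ (l : List Int),
    l.Pairwise (fun a b => rbk k a b = true) → (∀ y ∈ l, y < x) →
    (PySem.List.insertBy (fun a b => decide (k a < k b)) x l).Pairwise
      (fun a b => rbk k a b = true) := by
  intro l
  induction l with
  | nil => intro _ _; simp [PySem.List.insertBy]
  | cons y t ih =>
      intro hl hx
      rw [insertBy_cons]
      rcases List.pairwise_cons.mp hl with ⟨hyt, ht⟩
      by_cases hc : decide (k x < k y) = true
      · rw [if_pos hc]
        simp only [decide_eq_true_eq] at hc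
        refine List.pairwise_cons.mpr ⟨?_, hl⟩
        intro z hz
        rcases List.mem_cons.mp hz with hz | hz
        · subst hz; simp [rbk]; omega
        · have := rbk_le k (hyt z hz)
          simp [rbk]; omega
      · rw [if_neg (by simpa using hc)]
        simp only [decide_eq_true_eq] at hc
        refine List.pairwise_cons.mpr ⟨?_, ih ht (fun z hz => hx z (by simp [hz]))⟩
        intro z hz
        rcases (PySem.List.mem_insertBy _ _ _ _).mp hz with hz | hz
        · have hyx : y < x := hx y (by simp)
          rw [hz]
          simp [rbk]; omega
        · exact hyt z hz

theorem foldl_insertBy_pairwise_rbk (k : Int → Int) : ∀ (xs acc : List Int),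
    xs.Pairwise (· < ·) → acc.Pairwise (fun a b => rbk k a b = true) →
    (∀ y ∈ acc, ∀ x ∈ xs, y < x) →
    (xs.foldl (fun acc x => PySem.List.insertBy (fun a b => decide (k a < k b)) x acc) acc).Pairwise
      (fun a b => rbk k a b = true) := by
  intro xs
  induction xs with
  | nil => intro acc _ hacc _; exact hacc
  | cons x t ih =>
      intro acc hxs hacc hmix
      rcases List.pairwise_cons.mp hxs with ⟨hxt, ht⟩
      rw [List.foldl_cons]
      refine ih _ ht (insertBy_pairwise_rbk k x acc hacc (fun y hy => hmix y hy x (by simp))) ?_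
      intro y hy z hz
      rcases (PySem.List.mem_insertBy _ _ _ _).mp hy with hy | hy
      · subst hy; exact hxt z hz
      · exact hmix y hy z (by simp [hz])

theorem lcScan_of_not_mem : ∀ (l : List Int) (s c d : Int), c ∉ l → lcScan l s c d = d := by
  intro l
  induction l with
  | nil => intro s c d _; rfl
  | cons x t ih =>
      intro s c d hc
      rw [lcScan, if_neg (by intro h; exact hc (by simp [h])), ih]
      intro h; exact hc (by simp [h])

theorem lcScan_pairwise (k : Int → Int) : ∀ (l : List Int) (s c d : Int),
    l.Pairwise (fun a b => rbk k a b = true) → c ∈ l →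
    lcScan l s c d = s + 1 + (l.countP (fun y => rbk k y c) : Int) := by
  intro l
  induction l with
  | nil => intro s c d _ hc; simp at hc
  | cons x t ih =>
      intro s c d hl hc
      rcases List.pairwise_cons.mp hl with ⟨hxt, ht⟩
      by_cases hx : x = c
      · subst hx
        have hnt : x ∉ t := by
          intro hmem
          have := hxt x hmem
          rw [rbk_irrefl] at this
          exact Bool.false_ne_true this
        rw [lcScan, if_pos rfl, lcScan_of_not_mem t _ _ _ hnt]
        have hcount : (x :: t).countP (fun y => rbk k y x) = 0 := by
          rw [List.countP_eq_zero]
          intro y hy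
          rcases List.mem_cons.mp hy with hy | hy
          · subst hy; simp [rbk_irrefl]
          · simp [rbk_asymm k (hxt y hy)]
        rw [hcount]
        simp
      · have hct : c ∈ t := by
          rcases List.mem_cons.mp hc with h | h
          · exact absurd h.symm hx
          · exact h
        rw [lcScan, if_neg hx, ih (s + 1) c _ ht hct, List.countP_cons]
        have hxc : rbk k x c = true := hxt c hct
        simp [hxc]
        omega

theorem getD_set_int {α : Type} (a : List α) (x : Int) (hx0 : 0 ≤ x) (c : Nat) (v d : α) :
    PySem.List.pyGetD (PySem.List.pySetD a x v) (c : Int) d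
      = if (c : Int) = x ∧ x < (a.length : Int) then v else PySem.List.pyGetD a (c : Int) d := by
  rw [PySem.List.pySetD_of_nonneg a v hx0, PySem.List.pyGetD_natCast, PySem.List.pyGetD_natCast]
  rw [List.getD_eq_getElem?_getD, List.getD_eq_getElem?_getD, List.getElem?_set]
  by_cases h1 : x.toNat = c
  · rw [if_pos h1]
    by_cases h2 : x.toNat < a.length
    · rw [if_pos h2, if_pos (⟨by omega, by omega⟩ : ((c : Int) = x ∧ x < (a.length : Int)))]
      rfl
    · rw [if_neg h2, if_neg (by rintro ⟨hh1, hh2⟩; omega)]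
      rw [List.getElem?_eq_none (by omega : a.length ≤ c)]
  · rw [if_neg h1, if_neg (by rintro ⟨hh1, hh2⟩; omega)]

theorem entry_eq_getElem (o : List (List Int)) (r c : Nat) (hr : r < o.length)
    (hc : c < o[r].length) :
    PySem.List.pyGetD (PySem.List.pyGetD o (r : Int) []) (c : Int) 0 = o[r][c] := by
  rw [PySem.List.pyGetD_natCast o, List.getD_eq_getElem o [] hr, PySem.List.pyGetD_natCast,
    List.getD_eq_getElem _ 0 hc]

theorem enumerate_map {α β : Type} (f : α → β) (l : List α) : ∀ (s : Int),
    PySem.List.enumerate (l.map f) s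
      = (PySem.List.enumerate l s).map (fun q => (q.1, f q.2)) := by
  induction l with
  | nil => intro s; simp [PySem.List.enumerate_nil]
  | cons x t ih =>
      intro s
      rw [List.map_cons, PySem.List.enumerate_cons, PySem.List.enumerate_cons, List.map_cons, ih]

-- common abbreviations for A's paint loops (proof-only helpers)
def paintColF (grid : List (List Int)) (color c : Int) (rs : List Int)
    (out : List (List Int)) : List (List Int) :=
  rs.foldl (fun o r =>
    if PySem.List.pyGetD (PySem.List.pyGetD grid r []) c 0 = 5 then
      PySem.List.pySetD o r (PySem.List.pySetD (PySem.List.pyGetD o r []) c color)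
    else o) out

theorem paintColF_shape (grid : List (List Int)) (color c : Int) (W : Nat) :
    ∀ (rs : List Int) (out : List (List Int)),
    (∀ r ∈ rs, 0 ≤ r) → (∀ row ∈ out, row.length = W) →
    ((paintColF grid color c rs out).length = out.length ∧
     ∀ row ∈ paintColF grid color c rs out, row.length = W) := by
  intro rs
  induction rs with
  | nil => intro out _ hrow; exact ⟨rfl, hrow⟩
  | cons r rs ih =>
      intro out hrs hrow
      have hr0 : 0 ≤ r := hrs r (by simp)
      simp only [paintColF, List.foldl_cons]
      by_cases h : PySem.List.pyGetD (PySem.List.pyGetD grid r []) c 0 = 5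
      · rw [if_pos h]
        have hset := PySem.List.pySetD_of_nonneg out
          (v := PySem.List.pySetD (PySem.List.pyGetD out r []) c color) hr0
        by_cases hlt : r.toNat < out.length
        · have hrowmem : PySem.List.pyGetD out r [] = out[r.toNat] := by
            rw [PySem.List.pyGetD_of_nonneg out [] hr0, List.getD_eq_getElem out [] hlt]
          have hrow' : ∀ row ∈ PySem.List.pySetD out r
              (PySem.List.pySetD (PySem.List.pyGetD out r []) c color), row.length = W := by
            rw [hset]
            intro row hmem
            rcases List.mem_or_eq_of_mem_set hmem with hm | hm
            · exact hrow row hm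
            · rw [hm, PySem.List.length_pySetD, hrowmem]
              exact hrow _ (List.getElem_mem hlt)
          have := ih _ (fun y hy => hrs y (List.mem_cons_of_mem _ hy)) hrow'
          rw [paintColF] at this
          refine ⟨this.1.trans ?_, this.2⟩
          rw [PySem.List.length_pySetD]
        · have hnoop : PySem.List.pySetD out r
              (PySem.List.pySetD (PySem.List.pyGetD out r []) c color) = out := by
            rw [hset, List.set_eq_of_length_le (by omega)]
          rw [hnoop]
          have := ih _ (fun y hy => hrs y (List.mem_cons_of_mem _ hy)) hrow
          rw [paintColF] at this
          exact this
      · rw [if_neg h]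
        have := ih _ (fun y hy => hrs y (List.mem_cons_of_mem _ hy)) hrow
        rw [paintColF] at this
        exact this

theorem paintColF_entry (grid : List (List Int)) (color c : Int) (W : Nat)
    (hc0 : 0 ≤ c) (hcW : c < (W : Int)) :
    ∀ (rs : List Int) (out : List (List Int)) (r0 c0 : Nat),
    (∀ r ∈ rs, 0 ≤ r) → (∀ row ∈ out, row.length = W) → r0 < out.length → c0 < W →
    PySem.List.pyGetD (PySem.List.pyGetD (paintColF grid color c rs out) (r0 : Int) [])
        (c0 : Int) 0 =
      if ((r0 : Int) ∈ rs ∧ (c0 : Int) = c ∧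
          PySem.List.pyGetD (PySem.List.pyGetD grid (r0 : Int) []) c 0 = 5) then color
      else PySem.List.pyGetD (PySem.List.pyGetD out (r0 : Int) []) (c0 : Int) 0 := by
  intro rs
  induction rs with
  | nil =>
      intro out r0 c0 _ _ _ _
      rw [paintColF, List.foldl_nil, if_neg (by rintro ⟨hm, -⟩; simp at hm)]
  | cons r rs ih =>
      intro out r0 c0 hrs hrow hr0len hc0W
      have hr0 : 0 ≤ r := hrs r (by simp)
      have hstep : ∀ o' , o' = (if PySem.List.pyGetD (PySem.List.pyGetD grid r []) c 0 = 5 then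
          PySem.List.pySetD out r (PySem.List.pySetD (PySem.List.pyGetD out r []) c color)
          else out) →
          PySem.List.pyGetD (PySem.List.pyGetD o' (r0 : Int) []) (c0 : Int) 0 =
          if ((r0 : Int) = r ∧ (c0 : Int) = c ∧
              PySem.List.pyGetD (PySem.List.pyGetD grid (r0 : Int) []) c 0 = 5) then color
          else PySem.List.pyGetD (PySem.List.pyGetD out (r0 : Int) []) (c0 : Int) 0 := by
        intro o' ho'
        by_cases h : PySem.List.pyGetD (PySem.List.pyGetD grid r []) c 0 = 5
        · rw [if_pos h] at ho'
          subst ho'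
          rw [getD_set_int out r hr0 r0]
          by_cases hreq : (r0 : Int) = r
          · rw [if_pos ⟨hreq, by omega⟩]
            have hrw : PySem.List.pyGetD out r [] = PySem.List.pyGetD out (r0 : Int) [] := by
              rw [hreq]
            rw [hrw, getD_set_int _ c hc0 c0]
            have hrowW : (PySem.List.pyGetD out (r0 : Int) []).length = W := by
              rw [PySem.List.pyGetD_natCast, List.getD_eq_getElem out [] hr0len]
              exact hrow _ (List.getElem_mem hr0len)
            have hcond : PySem.List.pyGetD (PySem.List.pyGetD grid (r0 : Int) []) c 0 = 5 := by
              rw [hreq]; exact h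
            by_cases hcc : (c0 : Int) = c
            · rw [if_pos ⟨hcc, by rw [hrowW]; exact hcW⟩, if_pos ⟨hreq, hcc, hcond⟩]
            · rw [if_neg (by rintro ⟨h1, -⟩; exact hcc h1),
                if_neg (by rintro ⟨-, h1, -⟩; exact hcc h1)]
          · rw [if_neg (by rintro ⟨h1, -⟩; exact hreq h1),
              if_neg (by rintro ⟨h1, -⟩; exact hreq h1)]
        · rw [if_neg h] at ho'
          subst ho'
          rw [if_neg (by rintro ⟨h1, -, h2⟩; rw [h1] at h2; exact h h2)]
      have honeshape : ∀ row ∈ (if PySem.List.pyGetD (PySem.List.pyGetD grid r []) c 0 = 5 then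
          PySem.List.pySetD out r (PySem.List.pySetD (PySem.List.pyGetD out r []) c color)
          else out), row.length = W := by
        have := paintColF_shape grid color c W [r] out (by simpa using hr0) hrow
        simpa [paintColF] using this.2
      have honelen : (if PySem.List.pyGetD (PySem.List.pyGetD grid r []) c 0 = 5 then
          PySem.List.pySetD out r (PySem.List.pySetD (PySem.List.pyGetD out r []) c color)
          else out).length = out.length := by
        have := paintColF_shape grid color c W [r] out (by simpa using hr0) hrow
        simpa [paintColF] using this.1
      rw [paintColF, List.foldl_cons]
      have goalstep := ih (out := (if PySem.List.pyGetD (PySem.List.pyGetD grid r []) c 0 = 5 then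
          PySem.List.pySetD out r (PySem.List.pySetD (PySem.List.pyGetD out r []) c color)
          else out)) (r0 := r0) (c0 := c0) (fun y hy => hrs y (List.mem_cons_of_mem _ hy)) honeshape (by omega) hc0W
      rw [paintColF] at goalstep
      rw [goalstep, hstep _ rfl]
      by_cases hA : (r0 : Int) ∈ rs ∧ (c0 : Int) = c ∧
          PySem.List.pyGetD (PySem.List.pyGetD grid (r0 : Int) []) c 0 = 5
      · rw [if_pos hA, if_pos ⟨List.mem_cons_of_mem _ hA.1, hA.2⟩]
      · rw [if_neg hA]
        by_cases hB : (r0 : Int) = r ∧ (c0 : Int) = c ∧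
            PySem.List.pyGetD (PySem.List.pyGetD grid (r0 : Int) []) c 0 = 5
        · rw [if_pos hB, if_pos ⟨by rw [hB.1]; exact List.mem_cons_self, hB.2⟩]
        · rw [if_neg hB, if_neg (by
            rintro ⟨hm, hrest⟩
            rcases List.mem_cons.mp hm with hm | hm
            · exact hB ⟨hm, hrest⟩
            · exact hA ⟨hm, hrest⟩)]

-- A's outer paint fold over the enumerated sorted columns
theorem paintFold_entry (grid : List (List Int)) (W : Nat) :
    ∀ (l : List Int) (s : Int) (out : List (List Int)) (r0 c0 : Nat),
    (∀ x ∈ l, 0 ≤ x ∧ x < (W : Int)) → (∀ row ∈ out, row.length = W) →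
    out.length = grid.length → r0 < out.length → c0 < W →
    PySem.List.pyGetD (PySem.List.pyGetD
        ((PySem.List.enumerate l s).foldl (fun out q =>
          paintColF grid (q.1 + 1) q.2 (PySem.List.pyRange 0 (PySem.List.len grid)) out) out)
        (r0 : Int) []) (c0 : Int) 0 =
      if PySem.List.pyGetD (PySem.List.pyGetD grid (r0 : Int) []) (c0 : Int) 0 = 5 then
        lcScan l s (c0 : Int)
          (PySem.List.pyGetD (PySem.List.pyGetD out (r0 : Int) []) (c0 : Int) 0)
      else PySem.List.pyGetD (PySem.List.pyGetD out (r0 : Int) []) (c0 : Int) 0 := by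
  intro l
  induction l with
  | nil =>
      intro s out r0 c0 _ _ _ _ _
      rw [PySem.List.enumerate_nil, List.foldl_nil, lcScan]
      split <;> rfl
  | cons x t ih =>
      intro s out r0 c0 hl hrow hlen hr0 hc0
      obtain ⟨hx0, hxW⟩ := hl x (by simp)
      rw [PySem.List.enumerate_cons, List.foldl_cons]
      have hrange : ∀ r ∈ PySem.List.pyRange 0 (PySem.List.len grid), 0 ≤ r := by
        intro r hr
        exact (PySem.List.mem_pyRange_one.mp hr).1
      have hshape := paintColF_shape grid (s + 1) x W
        (PySem.List.pyRange 0 (PySem.List.len grid)) out hrange hrow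
      have hentry := paintColF_entry grid (s + 1) x W hx0 hxW
        (PySem.List.pyRange 0 (PySem.List.len grid)) out r0 c0 hrange hrow hr0 hc0
      rw [ih (s + 1) _ r0 c0 (fun y hy => hl y (by simp [hy])) hshape.2
        (hshape.1.trans hlen) (by omega) hc0]
      have hmem : (r0 : Int) ∈ PySem.List.pyRange 0 (PySem.List.len grid) := by
        rw [PySem.List.mem_pyRange_one, PySem.List.len_eq]
        constructor
        · omega
        · omega
      rw [hentry]
      by_cases h5 : PySem.List.pyGetD (PySem.List.pyGetD grid (r0 : Int) []) (c0 : Int) 0 = 5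
      · rw [if_pos h5, if_pos h5, lcScan]
        congr 1
        by_cases hcx : (c0 : Int) = x
        · rw [if_pos ⟨hmem, hcx, by rw [← hcx]; exact h5⟩, if_pos (by omega)]
        · rw [if_neg (by rintro ⟨-, h1, -⟩; exact hcx h1), if_neg (by omega)]
      · rw [if_neg h5, if_neg h5]
        by_cases hcx : (c0 : Int) = x
        · rw [if_neg (by rintro ⟨-, -, h1⟩; rw [hcx] at h5; exact h5 h1)]
        · rw [if_neg (by rintro ⟨-, h1, -⟩; exact hcx h1)]

theorem paintFold_shape (grid : List (List Int)) (W : Nat) :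
    ∀ (l : List (Int × (Int × Int))) (out : List (List Int)), (∀ row ∈ out, row.length = W) →
    ((l.foldl (fun out q =>
        paintColF grid (q.1 + 1) q.2.2 (PySem.List.pyRange 0 (PySem.List.len grid)) out) out).length
        = out.length ∧
     ∀ row ∈ l.foldl (fun out q =>
        paintColF grid (q.1 + 1) q.2.2 (PySem.List.pyRange 0 (PySem.List.len grid)) out) out,
        row.length = W) := by
  intro l
  induction l with
  | nil => intro out hrow; exact ⟨rfl, hrow⟩
  | cons q t ih =>
      intro out hrow
      have hrange : ∀ r ∈ PySem.List.pyRange 0 (PySem.List.len grid), 0 ≤ r :=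
        fun r hr => (PySem.List.mem_pyRange_one.mp hr).1
      have h1 := paintColF_shape grid (q.1 + 1) q.2.2 W
        (PySem.List.pyRange 0 (PySem.List.len grid)) out hrange hrow
      rw [List.foldl_cons]
      have h2 := ih _ h1.2
      exact ⟨h2.1.trans h1.1, h2.2⟩

-- the shared height of column c, the column width, and B's tables, as read by both ports
def hgtF (grid : List (List Int)) (c : Int) : Int :=
  (PySem.List.pyRange 0 (PySem.List.len grid)).foldl
    (fun s r => if PySem.List.pyGetD (PySem.List.pyGetD grid r []) c 0 = 5 then s + 1 else s) 0

def CCF (grid : List (List Int)) : Int := PySem.List.len (PySem.List.pyGetD grid 0 [])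

def heightsF (grid : List (List Int)) : List Int :=
  (PySem.List.pyRange 0 (CCF grid)).map (fun c =>
    (PySem.List.pyRange 0 (PySem.List.len grid)).foldl
      (fun s r => if PySem.List.pyGetD (PySem.List.pyGetD grid r []) c 0 = 5 then s + 1 else s) 0)

def colsF (grid : List (List Int)) : List Int :=
  (PySem.List.pyRange 0 (CCF grid)).filter (fun c => decide (hgtF grid c > 0))

def ordF (grid : List (List Int)) : List Int :=
  PySem.List.sorted (colsF grid) (fun c => -(hgtF grid c))

-- B's per-column color, phrased with the shared tables (definitionally B's `color`)
def colorF (grid : List (List Int)) (c : Int) : Int :=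
  let h : Int := PySem.List.pyGetD (heightsF grid) c 0
  if h = 0 then 0
  else 1 + (PySem.List.pyRange 0 (CCF grid)).foldl
    (fun s c2 => if PySem.List.pyGetD (heightsF grid) c2 0 > h ∨
        (PySem.List.pyGetD (heightsF grid) c2 0 = h ∧ c2 < c) then s + 1 else s) 0

theorem heightsF_get (grid : List (List Int)) (c : Int) (h0 : 0 ≤ c) (hC : c < CCF grid) :
    PySem.List.pyGetD (heightsF grid) c 0 = hgtF grid c := by
  rw [heightsF, PySem.List.pyGetD_map_pyRange_of_nonneg _ _ _ _ h0 hC]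
  rfl

theorem hgtF_nonneg (grid : List (List Int)) (c : Int) : 0 ≤ hgtF grid c := by
  rw [hgtF, PySem.List.foldl_ite_add_one]
  positivity

theorem ordF_pairwise (grid : List (List Int)) :
    (ordF grid).Pairwise (fun a b => rbk (fun c => -(hgtF grid c)) a b = true) := by
  rw [ordF, PySem.List.sorted_eq_foldl_insertBy]
  apply foldl_insertBy_pairwise_rbk
  · exact List.Pairwise.filter _ (PySem.List.pairwise_lt_pyRange_one 0 (CCF grid))
  · exact List.Pairwise.nil
  · intro y hy; simp at hy

-- B's counted rank for a 5-column equals A's last write into that column: 1 + its index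
-- in the stable descending sort
theorem colorF_eq_lcScan (grid : List (List Int)) (c : Int) (h0 : 0 ≤ c) (hC : c < CCF grid) :
    colorF grid c = lcScan (ordF grid) 0 c 0 := by
  show (if PySem.List.pyGetD (heightsF grid) c 0 = 0 then 0
    else 1 + (PySem.List.pyRange 0 (CCF grid)).foldl
      (fun s c2 => if PySem.List.pyGetD (heightsF grid) c2 0 > PySem.List.pyGetD (heightsF grid) c 0 ∨
          (PySem.List.pyGetD (heightsF grid) c2 0 = PySem.List.pyGetD (heightsF grid) c 0 ∧ c2 < c)
        then s + 1 else s) 0) = lcScan (ordF grid) 0 c 0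
  rw [heightsF_get grid c h0 hC]
  by_cases hz : hgtF grid c = 0
  · rw [if_pos hz]
    have hnc : c ∉ ordF grid := by
      rw [ordF, PySem.List.mem_sorted, colsF, List.mem_filter]
      rintro ⟨-, hcc⟩
      simp at hcc
      omega
    rw [lcScan_of_not_mem _ _ _ _ hnc]
  · rw [if_neg hz]
    have hpos : 0 < hgtF grid c := lt_of_le_of_ne (hgtF_nonneg grid c) (Ne.symm hz)
    have hmemcols : c ∈ colsF grid := by
      rw [colsF, List.mem_filter]
      exact ⟨PySem.List.mem_pyRange_one.mpr ⟨h0, hC⟩, by simpa using hpos⟩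
    have hmem : c ∈ ordF grid := (PySem.List.mem_sorted _ _ _ _).mpr hmemcols
    rw [lcScan_pairwise (fun c => -(hgtF grid c)) (ordF grid) 0 c 0 (ordF_pairwise grid) hmem]
    have hperm := PySem.List.sorted_perm (colsF grid) (fun c => -(hgtF grid c)) (rev := false)
    rw [show (ordF grid).countP (fun y => rbk (fun c => -(hgtF grid c)) y c)
        = (colsF grid).countP (fun y => rbk (fun c => -(hgtF grid c)) y c) from
      hperm.countP_eq _]
    rw [colsF, List.countP_filter]
    have hbool : ∀ y : Int, ((rbk (fun c => -(hgtF grid c)) y c && decide (hgtF grid y > 0)) = true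
        ↔ decide (hgtF grid y > hgtF grid c ∨ (hgtF grid y = hgtF grid c ∧ y < c)) = true) := by
      intro y
      simp only [rbk, Bool.and_eq_true, decide_eq_true_eq]
      omega
    have hcongr : (PySem.List.pyRange 0 (CCF grid)).foldl
        (fun s c2 => if PySem.List.pyGetD (heightsF grid) c2 0 > hgtF grid c ∨
            (PySem.List.pyGetD (heightsF grid) c2 0 = hgtF grid c ∧ c2 < c) then s + 1 else s) (0 : Int)
        = (PySem.List.pyRange 0 (CCF grid)).foldl
        (fun s c2 => if hgtF grid c2 > hgtF grid c ∨
            (hgtF grid c2 = hgtF grid c ∧ c2 < c) then s + 1 else s) (0 : Int) := by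
      apply PySem.List.foldl_congr_mem
      intro acc x hx
      obtain ⟨hx0, hxC⟩ := PySem.List.mem_pyRange_one.mp hx
      rw [heightsF_get grid x hx0 hxC]
    have hfold : (PySem.List.pyRange 0 (CCF grid)).foldl
        (fun s c2 => if hgtF grid c2 > hgtF grid c ∨
            (hgtF grid c2 = hgtF grid c ∧ c2 < c) then s + 1 else s) (0 : Int)
        = ((PySem.List.pyRange 0 (CCF grid)).countP
            (fun y => rbk (fun c => -(hgtF grid c)) y c && decide (hgtF grid y > 0)) : Int) := by
      rw [PySem.List.foldl_ite_add_one]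
      rw [List.countP_congr (fun y _ => hbool y)]
      omega
    rw [hcongr, hfold]
    omega

set_option maxHeartbeats 1000000 in
theorem main_eq (grid : List (List Int)) : solve_08ed6ac7 grid = solve_08ed6ac7_alt grid := by
  have hW0 : 0 ≤ CCF grid := by rw [CCF, PySem.List.len_eq]; positivity
  set W : Nat := (PySem.List.pyGetD grid 0 []).length with hWdef
  have hCW : CCF grid = (W : Int) := by rw [CCF, PySem.List.len_eq]
  -- name both sides
  have hA : solve_08ed6ac7 grid =
      (PySem.List.enumerate (PySem.List.sorted
        ((PySem.List.pyRange 0 (CCF grid)).foldl (fun acc c =>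
          if hgtF grid c > 0 then acc ++ [(hgtF grid c, c)] else acc) [])
        (fun x => -x.1)) 0).foldl (fun out q =>
          paintColF grid (q.1 + 1) q.2.2 (PySem.List.pyRange 0 (PySem.List.len grid)) out)
        ((PySem.List.pyRange 0 (PySem.List.len grid)).map
          (fun _ => PySem.List.pyRepeat [0] (CCF grid))) := rfl
  have hB : solve_08ed6ac7_alt grid =
      (PySem.List.pyRange 0 (PySem.List.len grid)).map (fun r =>
        (PySem.List.pyRange 0 (CCF grid)).map (fun c =>
          if PySem.List.pyGetD (PySem.List.pyGetD grid r []) c 0 = 5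
          then PySem.List.pyGetD ((PySem.List.pyRange 0 (CCF grid)).map (colorF grid)) c 0
          else 0)) := rfl
  -- A's appended pair list is the filtered, mapped column list
  have hch : ((PySem.List.pyRange 0 (CCF grid)).foldl (fun acc c =>
      if hgtF grid c > 0 then acc ++ [(hgtF grid c, c)] else acc) [])
      = (colsF grid).map (fun c => (hgtF grid c, c)) := by
    have hfun : (fun (acc : List (Int × Int)) c =>
        if hgtF grid c > 0 then acc ++ [(hgtF grid c, c)] else acc)
        = (fun acc c => if (fun c => decide (hgtF grid c > 0)) c = true
            then acc ++ [(fun c => (hgtF grid c, c)) c] else acc) := by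
      funext acc c
      simp
    rw [hfun, PySem.List.foldl_append_if, colsF]
    rfl
  -- A's sorted pair list is the mapped sorted column list
  have hsortA : PySem.List.sorted ((colsF grid).map (fun c => (hgtF grid c, c)))
      (fun x => -x.1) = (ordF grid).map (fun c => (hgtF grid c, c)) := by
    rw [ordF]
    exact sorted_map_commute (fun c => (hgtF grid c, c)) (fun x => -x.1)
      (fun c => -(hgtF grid c)) (fun a c => rfl) (colsF grid)
  -- bounds for the ordered columns
  have hordmem : ∀ x ∈ ordF grid, 0 ≤ x ∧ x < (W : Int) := by
    intro x hx
    have hx' := List.mem_of_mem_filter ((PySem.List.mem_sorted _ _ _ _).mp hx)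
    obtain ⟨h1, h2⟩ := PySem.List.mem_pyRange_one.mp hx'
    exact ⟨h1, by omega⟩
  -- the initial zero grid
  have hlen0 : ((PySem.List.pyRange 0 (PySem.List.len grid)).map
      (fun _ => PySem.List.pyRepeat [(0 : Int)] (CCF grid))).length = grid.length := by
    rw [List.length_map, PySem.List.length_pyRange_one, PySem.List.len_eq]
    omega
  have hrow0 : ∀ row ∈ (PySem.List.pyRange 0 (PySem.List.len grid)).map
      (fun _ => PySem.List.pyRepeat [(0 : Int)] (CCF grid)), row.length = W := by
    intro row hrow
    obtain ⟨r, -, hr⟩ := List.mem_map.mp hrow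
    rw [← hr, PySem.List.pyRepeat_singleton, List.length_replicate]
    omega
  have hentry0 : ∀ (r0 c0 : Nat),
      r0 < ((PySem.List.pyRange 0 (PySem.List.len grid)).map
        (fun _ => PySem.List.pyRepeat [(0 : Int)] (CCF grid))).length →
      PySem.List.pyGetD (PySem.List.pyGetD ((PySem.List.pyRange 0 (PySem.List.len grid)).map
        (fun _ => PySem.List.pyRepeat [(0 : Int)] (CCF grid))) (r0 : Int) []) (c0 : Int) 0 = 0 := by
    intro r0 c0 hr0
    have hrowv : PySem.List.pyGetD ((PySem.List.pyRange 0 (PySem.List.len grid)).map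
        (fun _ => PySem.List.pyRepeat [(0 : Int)] (CCF grid))) (r0 : Int) []
        = PySem.List.pyRepeat [(0 : Int)] (CCF grid) := by
      rw [PySem.List.pyGetD_natCast, List.getD_eq_getElem _ [] hr0, List.getElem_map]
    rw [hrowv, PySem.List.pyRepeat_singleton, PySem.List.pyGetD_natCast,
      List.getD_eq_getElem?_getD, List.getElem?_replicate]
    split <;> rfl
  -- shapes of A's result
  have hshapeA := paintFold_shape grid W
    (PySem.List.enumerate ((ordF grid).map (fun c => (hgtF grid c, c))) 0)
    ((PySem.List.pyRange 0 (PySem.List.len grid)).map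
      (fun _ => PySem.List.pyRepeat [0] (CCF grid))) hrow0
  rw [hA, hB, hch, hsortA]
  -- turn A's fold over the mapped list into a fold over the columns
  rw [enumerate_map, List.foldl_map] at hshapeA ⊢
  dsimp only at hshapeA ⊢
  apply List.ext_getElem
  · rw [hshapeA.1, hlen0, List.length_map, PySem.List.length_pyRange_one, PySem.List.len_eq]
    omega
  · intro r0 hr1 hr2
    have hlenA : (List.foldl (fun x y =>
        paintColF grid (y.1 + 1) y.2 (PySem.List.pyRange 0 (PySem.List.len grid)) x)
        (List.map (fun _ => PySem.List.pyRepeat [0] (CCF grid))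
          (PySem.List.pyRange 0 (PySem.List.len grid)))
        (PySem.List.enumerate (ordF grid) 0)).length = grid.length := by
      rw [hshapeA.1, hlen0]
    have hr0n : r0 < grid.length := by omega
    apply List.ext_getElem
    · have hmemA := hshapeA.2 _ (List.getElem_mem hr1)
      rw [hmemA, List.getElem_map, List.length_map, PySem.List.length_pyRange_one]
      omega
    · intro c0 hc1 hc2
      have hc0W : c0 < W := by
        have hmemA := hshapeA.2 _ (List.getElem_mem hr1)
        omega
      have hentryA := paintFold_entry grid W (ordF grid) 0
        (List.map (fun _ => PySem.List.pyRepeat [0] (CCF grid))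
          (PySem.List.pyRange 0 (PySem.List.len grid))) r0 c0
        hordmem hrow0 hlen0 (by omega) hc0W
      rw [← entry_eq_getElem _ r0 c0 hr1 hc1, hentryA, hentry0 r0 c0 (by omega)]
      -- the B side cell
      simp only [List.getElem_map, PySem.List.getElem_pyRange_one, zero_add]
      rw [PySem.List.pyGetD_map_pyRange_of_nonneg (colorF grid) (CCF grid) ((c0 : Int)) 0
        (by positivity) (by omega)]
      rw [colorF_eq_lcScan grid (c0 : Int) (by positivity) (by omega)]

-- ===== VERDICT (by name: the statement is the Claim_ definition above) =====
theorem solve_08ed6ac7_spec : Claim_equal_solve_08ed6ac7 := by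
  intro grid _ _
  exact main_eq grid
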